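-- pv_equiv track=rewrite | github.com/JiruGutema/Tooran | C_Creating_Keys_for_StORages_Has_Become_My_Main_Skill.py | create_key
-- ===== SOURCE A (Python) =====
-- def create_key(n, x):
--     if n == 1:
--         return [x]
--
--     k = 0
--     while (1 << k) - 1 < x:
--         k += 1
--
--     if k > n:
--         k = n
--
--     a = list(range(k))
--     a.extend([x] * (n - k))
--
--     return a
-- ===== SOURCE B (Python) =====
-- def create_key(n, x):
--     # Per-position decision instead of precomputing the split point k:
--     # position i holds i exactly when x still has a set bit at or above i
--     # (x >> i > 0), which is equivalent to A's (1 << i) - 1 < x; otherwise x.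
--     if n == 1:
--         return [x]
--     return [i if x >> i > 0 else x for i in range(n)]
-- ===== Notes on version B (the rewrite author's own statement) =====
-- stated objective: alternative
-- what changed: B never computes the split point k at all: instead of A's bit-search loop, clamp, range-list and extend, B decides each position i independently inside one comprehension by testing x >> i > 0 (x still has a set bit at or above i), exploiting that this per-position test is equivalent to i < k.
import Mathlib
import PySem

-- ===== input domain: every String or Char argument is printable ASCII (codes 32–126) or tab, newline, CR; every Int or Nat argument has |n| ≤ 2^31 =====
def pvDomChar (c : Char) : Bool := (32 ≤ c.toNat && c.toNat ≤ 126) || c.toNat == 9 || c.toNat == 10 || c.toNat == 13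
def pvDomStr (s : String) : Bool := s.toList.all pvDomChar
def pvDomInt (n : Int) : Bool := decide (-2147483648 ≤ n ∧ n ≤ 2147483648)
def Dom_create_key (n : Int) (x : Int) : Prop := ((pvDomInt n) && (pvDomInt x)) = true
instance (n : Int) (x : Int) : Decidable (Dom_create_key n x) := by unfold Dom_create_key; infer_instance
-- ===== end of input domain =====

-- B drops A's whole k-computation (bit-search loop, clamp, range+extend) and instead
-- decides each position independently with the shift test x >> i > 0 in one comprehension.

-- ===== PORT A =====
-- the `while (1 << k) - 1 < x: k += 1` loop; fuel (x.toNat + 1 steps) only makes the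
-- same computation total — it is never exhausted on the actual call (proved below)
def create_key_loop (x : Int) : Nat → Nat → Nat
  | 0, k => k
  | fuel+1, k => if ((1 <<< k : Nat) : Int) - 1 < x then create_key_loop x fuel (k+1) else k

def create_key (n : Int) (x : Int) : List Int :=
  if n == 1 then [x]
  else
    let k : Int := (create_key_loop x (x.toNat + 1) 0 : Int)
    let k := if k > n then n else k
    PySem.List.pyRange 0 k 1 ++ List.replicate (n - k).toNat x

-- ===== PORT B =====
-- Python's `x >> i` is Lean's `x >>> i.toNat`; exact here since i ranges over range(n), i ≥ 0
def create_key_alt (n : Int) (x : Int) : List Int :=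
  if n == 1 then [x]
  else (PySem.List.pyRange 0 n 1).map (fun i => if 0 < x >>> i.toNat then i else x)

-- ===== PRECONDITION & SPEC =====
def Spec_create_key (n : Int) (x : Int) (out : List Int) : Prop := out = create_key_alt n x
instance (n : Int) (x : Int) (out : List Int) : Decidable (Spec_create_key n x out) := by unfold Spec_create_key; infer_instance

-- ===== CLAIM (what is proved, stated in full; the proofs are below) =====
def Claim_equal_create_key : Prop := ∀ (n : Int) (x : Int), Dom_create_key n x → Spec_create_key n x (create_key n x)

-- ===== LEMMAS AND PROOFS =====

-- the loop condition `(1 << k) - 1 < x` holds iff k < bit_length x (for x > 0)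
theorem loop_cond_iff (x : Int) (hx : 0 < x) (k : Nat) :
    ((1 <<< k : Nat) : Int) - 1 < x ↔ k < PySem.Int.bitLength x := by
  rw [Nat.shiftLeft_eq, Nat.one_mul]
  have habs : x.natAbs = x.toNat := by omega
  constructor
  · intro h
    by_contra hle
    push Not at hle
    have h1 := PySem.Int.lt_two_pow_bitLength x
    have h2 : (2:Nat) ^ PySem.Int.bitLength x ≤ 2 ^ k :=
      Nat.pow_le_pow_right (by norm_num) hle
    omega
  · intro h
    have h1 := PySem.Int.two_pow_bitLength_le x (by omega)
    have h2 : (2:Nat) ^ k ≤ 2 ^ (PySem.Int.bitLength x - 1) :=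
      Nat.pow_le_pow_right (by norm_num) (by omega)
    omega

theorem loop_eq_bitLength (x : Int) (hx : 0 < x) :
    ∀ fuel k, k ≤ PySem.Int.bitLength x → PySem.Int.bitLength x ≤ k + fuel →
      create_key_loop x fuel k = PySem.Int.bitLength x := by
  intro fuel
  induction fuel with
  | zero => intro k h1 h2; simp [create_key_loop]; omega
  | succ f ih =>
    intro k h1 h2
    rw [create_key_loop]
    by_cases hk : k < PySem.Int.bitLength x
    · rw [if_pos ((loop_cond_iff x hx k).mpr hk)]
      exact ih (k+1) hk (by omega)
    · rw [if_neg (fun hc => hk ((loop_cond_iff x hx k).mp hc))]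
      omega

theorem loop_val (x : Int) :
    create_key_loop x (x.toNat + 1) 0 = (if 0 < x then PySem.Int.bitLength x else 0) := by
  by_cases hx : 0 < x
  · rw [if_pos hx]
    have hne : x ≠ 0 := by omega
    have h1 := PySem.Int.two_pow_bitLength_le x hne
    have h2 : PySem.Int.bitLength x - 1 < 2 ^ (PySem.Int.bitLength x - 1) := Nat.lt_two_pow_self
    have habs : x.natAbs = x.toNat := by omega
    exact loop_eq_bitLength x hx _ 0 (Nat.zero_le _) (by omega)
  · rw [if_neg hx]
    rw [create_key_loop]
    rw [if_neg (by simp; omega)]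

-- Mathlib's Int >>> Int by a natural number agrees with the core Int >>> Nat shift
theorem int_shiftRight_coe (x : Int) (k : Nat) : x >>> ((k : Nat) : Int) = x >>> k := by
  cases x <;> cases k <;> rfl

-- the per-position test: x >> i > 0 iff x > 0 and i < bit_length x
theorem natShift_pos (m i : Nat) : 0 < m >>> i ↔ 2 ^ i ≤ m := by
  rw [Nat.shiftRight_eq_div_pow]
  constructor
  · intro h
    by_contra hlt
    push Not at hlt
    rw [Nat.div_eq_of_lt hlt] at h
    exact absurd h (lt_irrefl 0)
  · intro h
    exact Nat.div_pos h (Nat.pow_pos (by norm_num))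

theorem pow_le_iff_lt_bitLength (m i : Nat) (hm : 0 < m) :
    2 ^ i ≤ m ↔ i < PySem.Int.bitLength ((m : Nat) : Int) := by
  have hA : ((m : Nat) : Int).natAbs = m := Int.natAbs_natCast m
  have h1 := PySem.Int.lt_two_pow_bitLength ((m : Nat) : Int)
  rw [hA] at h1
  constructor
  · intro h
    by_contra hle
    push Not at hle
    have h3 : (2:Nat) ^ PySem.Int.bitLength ((m : Nat) : Int) ≤ 2 ^ i :=
      Nat.pow_le_pow_right (by norm_num) hle
    omega
  · intro h
    have hne : ((m : Nat) : Int) ≠ 0 := by exact_mod_cast hm.ne'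
    have h2 := PySem.Int.two_pow_bitLength_le ((m : Nat) : Int) hne
    rw [hA] at h2
    have h3 : (2:Nat) ^ i ≤ 2 ^ (PySem.Int.bitLength ((m : Nat) : Int) - 1) :=
      Nat.pow_le_pow_right (by norm_num) (by omega)
    omega

theorem shift_pos_iff (x : Int) (i : Nat) :
    0 < x >>> i ↔ (0 < x ∧ i < PySem.Int.bitLength x) := by
  cases x with
  | ofNat m =>
    rw [show (Int.ofNat m) >>> i = ((m >>> i : Nat) : Int) from rfl,
        show (Int.ofNat m) = ((m : Nat) : Int) from rfl]
    constructor
    · intro h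
      have hp : 0 < m >>> i := by exact_mod_cast h
      have h2 := (natShift_pos m i).mp hp
      have hm : 0 < m := lt_of_lt_of_le (Nat.pow_pos (by norm_num)) h2
      exact ⟨by exact_mod_cast hm, (pow_le_iff_lt_bitLength m i hm).mp h2⟩
    · rintro ⟨hx, hi⟩
      have hm : 0 < m := by exact_mod_cast hx
      have h2 := (pow_le_iff_lt_bitLength m i hm).mpr hi
      have hp := (natShift_pos m i).mpr h2
      exact_mod_cast hp
  | negSucc m =>
    rw [show (Int.negSucc m) >>> i = Int.negSucc (m >>> i) from rfl]
    constructor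
    · intro h
      exact absurd h (not_lt.mpr (le_of_lt (Int.negSucc_lt_zero _)))
    · rintro ⟨hx, _⟩
      exact absurd hx (not_lt.mpr (le_of_lt (Int.negSucc_lt_zero _)))

-- range(k) ++ [x]*(n-k) = the per-position form over range(n)  (Nat side, a ≤ b)
theorem build_eq (a b : Nat) (x : Int) (hab : a ≤ b) :
    List.map (fun i : Nat => (i : Int)) (List.range a) ++ List.replicate (b - a) x
      = List.map (fun i : Nat => if (i : Int) < (a : Int) then (i : Int) else x) (List.range b) := by
  apply List.ext_getElem
  · simp; omega
  · intro i hi1 hi2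
    have hib : i < b := by simpa using hi2
    rw [List.getElem_map, List.getElem_range]
    by_cases hia : i < a
    · rw [List.getElem_append_left (by simpa using hia)]
      rw [List.getElem_map, List.getElem_range, if_pos (by exact_mod_cast hia)]
    · rw [List.getElem_append_right (by simp; omega), List.getElem_replicate,
        if_neg (by exact_mod_cast hia)]

theorem create_key_eq (n : Int) (x : Int) : create_key n x = create_key_alt n x := by
  by_cases h1 : n = 1
  · simp [create_key, create_key_alt, h1]
  · simp only [create_key, create_key_alt, beq_iff_eq, if_neg h1, loop_val]
    rw [show ((if 0 < x then PySem.Int.bitLength x else 0 : Nat) : Int)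
          = (if 0 < x then ((PySem.Int.bitLength x : Nat) : Int) else 0) from by split <;> simp]
    set K : Int := (if 0 < x then (PySem.Int.bitLength x : Int) else 0) with hK
    have hK0 : 0 ≤ K := by rw [hK]; split <;> simp
    by_cases hn : n ≤ 0
    · have hkk : (if K > n then n else K) = n := by split <;> omega
      have hrange : PySem.List.pyRange 0 n 1 = [] := by
        simp [PySem.List.pyRange]; omega
      rw [hkk, hrange]
      simp
    · have hmin : (if K > n then n else K) = min K n := by split <;> omega
      rw [hmin]
      set k : Int := min K n with hk
      have hk0 : 0 ≤ k := by omega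
      have hkn : k ≤ n := by omega
      have hkn' : k.toNat ≤ n.toNat := by omega
      have e1 : PySem.List.pyRange 0 k 1 = List.map (fun i : Nat => (i : Int)) (List.range k.toNat) := by
        rw [show k = (k.toNat : Int) from by omega, PySem.List.pyRange_zero_natCast]; simp
        rw [show (max k 0).toNat = k.toNat from by omega]
      have e2 : PySem.List.pyRange 0 n 1 = List.map (fun i : Nat => (i : Int)) (List.range n.toNat) := by
        rw [show n = (n.toNat : Int) from by omega, PySem.List.pyRange_zero_natCast]; simp
        rw [show (max n 0).toNat = n.toNat from by omega]
      have e3 : (n - k).toNat = n.toNat - k.toNat := by omega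
      rw [e1, e2, e3, build_eq k.toNat n.toNat x hkn', List.map_map]
      apply List.map_congr_left
      intro i hi
      simp only [Function.comp_apply, Int.toNat_natCast, int_shiftRight_coe, Nat.cast_zero]
      -- both conditions say i < k
      have hcond : (0 < x >>> i) ↔ ((i : Int) < ((k.toNat : Nat) : Int)) := by
        rw [shift_pos_iff]
        simp only [List.mem_range] at hi
        constructor
        · rintro ⟨hx, hbl⟩
          have : K = (PySem.Int.bitLength x : Int) := by rw [hK, if_pos hx]
          omega
        · intro hik
          have hx : 0 < x := by
            by_contra hx0
            have : K = 0 := by rw [hK, if_neg hx0]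
            omega
          have : K = (PySem.Int.bitLength x : Int) := by rw [hK, if_pos hx]
          exact ⟨hx, by omega⟩
      exact if_congr hcond.symm rfl rfl

-- ===== VERDICT (by name: the statement is the Claim_ definition above) =====
theorem create_key_spec : Claim_equal_create_key := by
  intro n x _
  unfold Spec_create_key
  exact create_key_eq n x
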